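-- pv_equiv track=rewrite | github.com/manman4/programming-_contest | zeta_tranform/zeta_transform.py | moebius_transform_2d
-- ===== SOURCE A (Python) =====
-- def moebius_transform_2d(a, n):
--     for i in range(n-1,-1,-1):
--         for j in range(n-1,-1,-1):
--             if i: a[i][j] -= a[i-1][j]
--     for i in range(n-1,-1,-1):
--         for j in range(n-1,-1,-1):
--             if j: a[i][j] -= a[i][j-1]
--     return a
-- ===== SOURCE B (Python) =====
-- def moebius_transform_2d(a, n):
--     # Single combined descending pass instead of A's two sweeps (mutates a in place, like A).
--     for i in range(n-1, -1, -1):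
--         for j in range(n-1, -1, -1):
--             if i and j:
--                 a[i][j] += a[i-1][j-1] - a[i-1][j] - a[i][j-1]
--             elif i:
--                 a[i][j] -= a[i-1][j]
--             elif j:
--                 a[i][j] -= a[i][j-1]
--     return a
-- ===== Notes on version B (the rewrite author's own statement) =====
-- stated objective: alternative
-- what changed: A's two separate descending sweeps (row differences over the whole matrix, then column differences) are fused into a single descending pass that applies the combined 2D difference a[i][j] += a[i-1][j-1] - a[i-1][j] - a[i][j-1] (with the proper boundary cases) to each cell once.
import Mathlib
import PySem

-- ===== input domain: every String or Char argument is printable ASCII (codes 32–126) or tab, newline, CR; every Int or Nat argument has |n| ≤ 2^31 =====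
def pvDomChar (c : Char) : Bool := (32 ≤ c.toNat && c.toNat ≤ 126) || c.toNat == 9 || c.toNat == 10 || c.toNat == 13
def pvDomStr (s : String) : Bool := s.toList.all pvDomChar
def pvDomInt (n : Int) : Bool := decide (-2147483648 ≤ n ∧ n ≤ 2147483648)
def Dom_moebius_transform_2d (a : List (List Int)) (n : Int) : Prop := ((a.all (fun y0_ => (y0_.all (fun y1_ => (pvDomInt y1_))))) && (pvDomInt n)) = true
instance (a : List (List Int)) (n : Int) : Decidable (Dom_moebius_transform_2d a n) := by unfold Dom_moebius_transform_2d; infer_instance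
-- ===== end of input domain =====

-- B fuses A's two separate descending difference sweeps into one combined descending pass.
-- Both Pythons mutate `a` in place and return it; the equivalence proved is about the return value.
-- Indexing a[i][j] is ported totally via getD/set; exact under Pre_, which keeps every access in range.

-- ===== PORT A =====
-- a[i][j] read / write
def pvGetv (m : List (List Int)) (i j : Nat) : Int := (m.getD i []).getD j 0
def pvSetv (m : List (List Int)) (i j : Nat) (v : Int) : List (List Int) :=
  m.set i ((m.getD i []).set j v)

def moebius_transform_2d (a : List (List Int)) (n : Int) : List (List Int) :=
  (PySem.List.pyRange (n-1) (-1) (-1)).foldl (fun s i =>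
    (PySem.List.pyRange (n-1) (-1) (-1)).foldl (fun s j =>
      if j ≠ 0 then
        pvSetv s i.toNat j.toNat (pvGetv s i.toNat j.toNat - pvGetv s i.toNat (j-1).toNat)
      else s) s)
    ((PySem.List.pyRange (n-1) (-1) (-1)).foldl (fun s i =>
      (PySem.List.pyRange (n-1) (-1) (-1)).foldl (fun s j =>
        if i ≠ 0 then
          pvSetv s i.toNat j.toNat (pvGetv s i.toNat j.toNat - pvGetv s (i-1).toNat j.toNat)
        else s) s) a)

-- ===== PORT B =====
def moebius_transform_2d_alt (a : List (List Int)) (n : Int) : List (List Int) :=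
  (PySem.List.pyRange (n-1) (-1) (-1)).foldl (fun s i =>
    (PySem.List.pyRange (n-1) (-1) (-1)).foldl (fun s j =>
      if i ≠ 0 ∧ j ≠ 0 then
        pvSetv s i.toNat j.toNat (pvGetv s i.toNat j.toNat +
          (pvGetv s (i-1).toNat (j-1).toNat - pvGetv s (i-1).toNat j.toNat - pvGetv s i.toNat (j-1).toNat))
      else if i ≠ 0 then
        pvSetv s i.toNat j.toNat (pvGetv s i.toNat j.toNat - pvGetv s (i-1).toNat j.toNat)
      else if j ≠ 0 then
        pvSetv s i.toNat j.toNat (pvGetv s i.toNat j.toNat - pvGetv s i.toNat (j-1).toNat)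
      else s) s) a

-- ===== PRECONDITION & SPEC =====
-- Pre_ excludes exactly the inputs on which A raises IndexError: n ≥ 2 while a has fewer
-- than n rows or one of the first n rows has fewer than n entries.
def Pre_moebius_transform_2d (a : List (List Int)) (n : Int) : Prop :=
  n ≤ 1 ∨ (n ≤ (a.length : Int) ∧ ∀ r ∈ a.take n.toNat, n ≤ (r.length : Int))
instance (a : List (List Int)) (n : Int) : Decidable (Pre_moebius_transform_2d a n) := by
  unfold Pre_moebius_transform_2d; infer_instance
def pvWitness_moebius_transform_2d : List (List Int) × Int := ([[1, 2], [3, 4]], 2)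

def Spec_moebius_transform_2d (a : List (List Int)) (n : Int) (out : List (List Int)) : Prop := out = moebius_transform_2d_alt a n
instance (a : List (List Int)) (n : Int) (out : List (List Int)) : Decidable (Spec_moebius_transform_2d a n out) := by unfold Spec_moebius_transform_2d; infer_instance

-- ===== CLAIM (what is proved, stated in full; the proofs are below) =====
def Claim_equal_moebius_transform_2d : Prop := ∀ (a : List (List Int)) (n : Int), Dom_moebius_transform_2d a n → Pre_moebius_transform_2d a n → Spec_moebius_transform_2d a n (moebius_transform_2d a n)

-- ===== LEMMAS AND PROOFS =====

-- descending index list n-1, n-2, …, 0 at the Nat level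
def pvCast (t : Nat) : Int := t

def pvDescN : Nat → List Nat
  | 0 => []
  | k + 1 => k :: pvDescN k

theorem pv_pyRange_descN (k : Nat) :
    PySem.List.pyRange ((k : Int) - 1) (-1) (-1) = (pvDescN k).map pvCast := by
  induction k with
  | zero => simp [pvDescN, PySem.List.pyRange_neg_one_eq_nil]
  | succ k ih =>
      have h1 : ((k + 1 : Nat) : Int) - 1 = (k : Int) := by push_cast; ring
      rw [pvDescN, List.map_cons, h1, PySem.List.pyRange_neg_one_cons (by omega)]
      exact congrArg (List.cons (pvCast k)) ih

theorem pv_pyRange_desc (n : Int) :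
    PySem.List.pyRange (n - 1) (-1) (-1) = (pvDescN n.toNat).map pvCast := by
  rcases (by omega : n ≤ 0 ∨ 0 < n) with h | h
  · have h0 : n.toNat = 0 := by omega
    rw [h0]
    simp [pvDescN, PySem.List.pyRange_neg_one_eq_nil (by omega : n - 1 ≤ -1)]
  · have h0 : n = ((n.toNat : Nat) : Int) := by omega
    rw [h0]
    exact pv_pyRange_descN n.toNat

theorem pv_foldl_cast {α : Type} (f : α → Nat → α) (g : α → Int → α)
    (h : ∀ s (t : Nat), g s (pvCast t) = f s t) :
    ∀ (L : List Nat) (s : α), (L.map pvCast).foldl g s = L.foldl f s := by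
  intro L
  induction L with
  | nil => intro s; rfl
  | cons t L ih => intro s; rw [List.map_cons, List.foldl_cons, List.foldl_cons, h]; exact ih _

-- Nat-level reformulations of the three sweeps
def pvStep1 (N : Nat) (s : List (List Int)) (i : Nat) : List (List Int) :=
  (pvDescN N).foldl (fun s j =>
    if i ≠ 0 then pvSetv s i j (pvGetv s i j - pvGetv s (i-1) j) else s) s

def pvStep2 (N : Nat) (s : List (List Int)) (i : Nat) : List (List Int) :=
  (pvDescN N).foldl (fun s j =>
    if j ≠ 0 then pvSetv s i j (pvGetv s i j - pvGetv s i (j-1)) else s) s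

def pvStepB (N : Nat) (s : List (List Int)) (i : Nat) : List (List Int) :=
  (pvDescN N).foldl (fun s j =>
    if i ≠ 0 ∧ j ≠ 0 then
      pvSetv s i j (pvGetv s i j + (pvGetv s (i-1) (j-1) - pvGetv s (i-1) j - pvGetv s i (j-1)))
    else if i ≠ 0 then pvSetv s i j (pvGetv s i j - pvGetv s (i-1) j)
    else if j ≠ 0 then pvSetv s i j (pvGetv s i j - pvGetv s i (j-1))
    else s) s

def pvSw1 (N : Nat) (a : List (List Int)) : List (List Int) := (pvDescN N).foldl (pvStep1 N) a
def pvSw2 (N : Nat) (a : List (List Int)) : List (List Int) := (pvDescN N).foldl (pvStep2 N) a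
def pvSwB (N : Nat) (a : List (List Int)) : List (List Int) := (pvDescN N).foldl (pvStepB N) a

theorem pv_portA_eq (a : List (List Int)) (n : Int) :
    moebius_transform_2d a n = pvSw2 n.toNat (pvSw1 n.toNat a) := by
  unfold moebius_transform_2d pvSw1 pvSw2
  rw [pv_pyRange_desc]
  have h1 : ((pvDescN n.toNat).map pvCast).foldl (fun s i =>
      ((pvDescN n.toNat).map pvCast).foldl (fun s j =>
        if i ≠ 0 then
          pvSetv s i.toNat j.toNat (pvGetv s i.toNat j.toNat - pvGetv s (i-1).toNat j.toNat)
        else s) s) a = (pvDescN n.toNat).foldl (pvStep1 n.toNat) a := by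
    apply pv_foldl_cast
    intro s t
    unfold pvStep1
    apply pv_foldl_cast
    intro s' u
    simp [pvCast]
  rw [h1]
  apply pv_foldl_cast
  intro s t
  unfold pvStep2
  apply pv_foldl_cast
  intro s' u
  simp [pvCast]

theorem pv_portB_eq (a : List (List Int)) (n : Int) :
    moebius_transform_2d_alt a n = pvSwB n.toNat a := by
  unfold moebius_transform_2d_alt pvSwB
  rw [pv_pyRange_desc]
  apply pv_foldl_cast
  intro s t
  unfold pvStepB
  apply pv_foldl_cast
  intro s' u
  simp [pvCast]

-- getD / set facts
theorem pv_getD_row_set_ne (r : List Int) (i j : Nat) (v : Int) (h : i ≠ j) :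
    (r.set i v).getD j 0 = r.getD j 0 := by
  simp [List.getD_eq_getElem?_getD, List.getElem?_set_ne h]

theorem pv_getD_row_set_self (r : List Int) (i : Nat) (v : Int) (h : i < r.length) :
    (r.set i v).getD i 0 = v := by
  simp [List.getD_eq_getElem?_getD, h]

theorem pv_set_getD_row (r : List Int) (j : Nat) : r.set j (r.getD j 0) = r := by
  by_cases h : j < r.length
  · simp [List.getD_eq_getElem?_getD, List.getElem?_eq_getElem h, List.set_getElem_self]
  · rw [List.set_eq_of_length_le (by omega)]

theorem pv_getD_mat_set_ne (s : List (List Int)) (i q : Nat) (r : List Int) (h : i ≠ q) :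
    (s.set i r).getD q [] = s.getD q [] := by
  simp [List.getD_eq_getElem?_getD, List.getElem?_set_ne h]

theorem pv_getD_mat_set_self (s : List (List Int)) (i : Nat) (r : List Int) (h : i < s.length) :
    (s.set i r).getD i [] = r := by
  simp [List.getD_eq_getElem?_getD, h]

theorem pv_set_getD_mat (s : List (List Int)) (i : Nat) : s.set i (s.getD i []) = s := by
  by_cases h : i < s.length
  · simp [List.getD_eq_getElem?_getD, List.getElem?_eq_getElem h, List.set_getElem_self]
  · rw [List.set_eq_of_length_le (by omega)]

theorem pv_getD_setv_self (s : List (List Int)) (i j : Nat) (v : Int) :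
    (pvSetv s i j v).getD i [] = (s.getD i []).set j v := by
  by_cases h : i < s.length
  · exact pv_getD_mat_set_self _ _ _ h
  · unfold pvSetv
    rw [List.set_eq_of_length_le (by omega)]
    have h0 : s.getD i [] = [] := by
      simp [List.getD_eq_getElem?_getD, List.getElem?_eq_none (by omega : s.length ≤ i)]
    rw [h0]
    rfl

theorem pv_getD_setv_ne (s : List (List Int)) (i j q : Nat) (v : Int) (h : i ≠ q) :
    (pvSetv s i j v).getD q [] = s.getD q [] := pv_getD_mat_set_ne _ _ _ _ h

theorem pv_setv_getv_self (s : List (List Int)) (i j : Nat) :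
    pvSetv s i j (pvGetv s i j) = s := by
  unfold pvSetv pvGetv
  rw [pv_set_getD_row, pv_set_getD_mat]

theorem pv_foldl_id {α : Type} : ∀ (L : List Nat) (s : α), L.foldl (fun s _ => s) s = s := by
  intro L
  induction L with
  | nil => intro s; rfl
  | cons t L ih => intro s; rw [List.foldl_cons]; exact ih s

-- a fold whose step writes only row i (reading rows q and i) is a single row update
theorem pv_foldl_rows (G : List Int → List Int → Nat → Int) (i q : Nat) (hqi : q ≠ i) :
    ∀ (L : List Nat) (s : List (List Int)),
      L.foldl (fun s j => pvSetv s i j (G (s.getD q []) (s.getD i []) j)) s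
        = s.set i (L.foldl (fun r j => r.set j (G (s.getD q []) r j)) (s.getD i [])) := by
  intro L
  induction L with
  | nil => intro s; rw [List.foldl_nil, List.foldl_nil, pv_set_getD_mat]
  | cons j0 L ih =>
      intro s
      rw [List.foldl_cons, List.foldl_cons, ih]
      rw [pv_getD_setv_self, pv_getD_setv_ne _ _ _ _ _ (by omega)]
      unfold pvSetv
      rw [List.set_set]

-- row-length preservation
theorem pv_rowfold_length (g : List Int → Nat → Int) :
    ∀ (L : List Nat) (r : List Int),
      (L.foldl (fun r j => r.set j (g r j)) r).length = r.length := by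
  intro L
  induction L with
  | nil => intro r; rfl
  | cons j L ih => intro r; rw [List.foldl_cons, ih, List.length_set]

-- shape preservation
def pvShape (s t : List (List Int)) : Prop :=
  s.length = t.length ∧ ∀ q, (s.getD q []).length = (t.getD q []).length

theorem pvShape_refl (s : List (List Int)) : pvShape s s := ⟨rfl, fun _ => rfl⟩

theorem pvShape_trans {s t u : List (List Int)} (h1 : pvShape s t) (h2 : pvShape t u) :
    pvShape s u := ⟨h1.1.trans h2.1, fun q => (h1.2 q).trans (h2.2 q)⟩

theorem pvShape_setv (s : List (List Int)) (i j : Nat) (v : Int) :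
    pvShape (pvSetv s i j v) s := by
  constructor
  · unfold pvSetv; exact List.length_set ..
  · intro q
    by_cases h : i = q
    · subst h; rw [pv_getD_setv_self, List.length_set]
    · rw [pv_getD_setv_ne _ _ _ _ _ h]

theorem pvShape_foldl {f : List (List Int) → Nat → List (List Int)}
    (hf : ∀ s x, pvShape (f s x) s) :
    ∀ (L : List Nat) (s : List (List Int)), pvShape (L.foldl f s) s := by
  intro L
  induction L with
  | nil => intro s; exact pvShape_refl s
  | cons x L ih => intro s; rw [List.foldl_cons]; exact pvShape_trans (ih (f s x)) (hf s x)

theorem pvShape_step1 (N : Nat) (s : List (List Int)) (i : Nat) : pvShape (pvStep1 N s i) s := by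
  unfold pvStep1
  apply pvShape_foldl
  intro s' j
  split_ifs
  · exact pvShape_setv ..
  · exact pvShape_refl _

theorem pvShape_step2 (N : Nat) (s : List (List Int)) (i : Nat) : pvShape (pvStep2 N s i) s := by
  unfold pvStep2
  apply pvShape_foldl
  intro s' j
  split_ifs
  · exact pvShape_setv ..
  · exact pvShape_refl _

theorem pvShape_stepB (N : Nat) (s : List (List Int)) (i : Nat) : pvShape (pvStepB N s i) s := by
  unfold pvStepB
  apply pvShape_foldl
  intro s' j
  split_ifs
  · exact pvShape_setv ..
  · exact pvShape_setv ..
  · exact pvShape_setv ..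
  · exact pvShape_refl _

theorem pvShape_sw1 (N : Nat) (a : List (List Int)) : pvShape (pvSw1 N a) a :=
  pvShape_foldl (pvShape_step1 N) _ a
theorem pvShape_sw2 (N : Nat) (a : List (List Int)) : pvShape (pvSw2 N a) a :=
  pvShape_foldl (pvShape_step2 N) _ a
theorem pvShape_swB (N : Nat) (a : List (List Int)) : pvShape (pvSwB N a) a :=
  pvShape_foldl (pvShape_stepB N) _ a

-- row-level characterisations
theorem pv_row1_getD (p : List Int) :
    ∀ (n : Nat) (r : List Int), n ≤ r.length → ∀ j,
      ((pvDescN n).foldl (fun r j => r.set j (r.getD j 0 - p.getD j 0)) r).getD j 0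
        = if j < n then r.getD j 0 - p.getD j 0 else r.getD j 0 := by
  intro n
  induction n with
  | zero => intro r _ j; rw [pvDescN, List.foldl_nil, if_neg (by omega)]
  | succ n ih =>
      intro r h j
      rw [pvDescN, List.foldl_cons]
      rw [ih (r.set n (r.getD n 0 - p.getD n 0)) (by rw [List.length_set]; omega) j]
      by_cases hj : j < n
      · rw [if_pos hj, if_pos (by omega), pv_getD_row_set_ne _ _ _ _ (by omega)]
      · by_cases hj2 : j = n
        · subst hj2
          rw [if_neg (by omega), if_pos (by omega)]
          exact pv_getD_row_set_self _ _ _ (by omega)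
        · rw [if_neg (by omega), if_neg (by omega), pv_getD_row_set_ne _ _ _ _ (by omega)]

theorem pv_row2_getD :
    ∀ (n : Nat) (r : List Int), n ≤ r.length → ∀ j,
      ((pvDescN n).foldl (fun r j =>
          r.set j (if j ≠ 0 then r.getD j 0 - r.getD (j-1) 0 else r.getD j 0)) r).getD j 0
        = if j < n ∧ 1 ≤ j then r.getD j 0 - r.getD (j-1) 0 else r.getD j 0 := by
  intro n
  induction n with
  | zero => intro r _ j; rw [pvDescN, List.foldl_nil, if_neg (by omega)]
  | succ n ih =>
      intro r h j
      rw [pvDescN, List.foldl_cons]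
      rw [ih (r.set n (if n ≠ 0 then r.getD n 0 - r.getD (n-1) 0 else r.getD n 0))
            (by rw [List.length_set]; omega) j]
      have hne : ∀ (v : Int) (m : Nat), n ≠ m → (r.set n v).getD m 0 = r.getD m 0 :=
        fun v m hm => pv_getD_row_set_ne r n m v hm
      by_cases hj2 : j = n
      · subst hj2
        have hs : ∀ (v : Int), (r.set j v).getD j 0 = v :=
          fun v => pv_getD_row_set_self r j v (by omega)
        simp only [hs]
        split_ifs <;> omega
      · by_cases hj : j < n
        · simp only [hne _ j (by omega), hne _ (j-1) (by omega)]
          split_ifs <;> omega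
        · simp only [hne _ j (by omega)]
          split_ifs <;> omega

theorem pv_rowB_getD (p : List Int) :
    ∀ (n : Nat) (r : List Int), n ≤ r.length → ∀ j,
      ((pvDescN n).foldl (fun r j =>
          r.set j (if j ≠ 0 then r.getD j 0 + (p.getD (j-1) 0 - p.getD j 0 - r.getD (j-1) 0)
                   else r.getD j 0 - p.getD j 0)) r).getD j 0
        = if j < n then
            (if 1 ≤ j then r.getD j 0 + (p.getD (j-1) 0 - p.getD j 0 - r.getD (j-1) 0)
             else r.getD j 0 - p.getD j 0)
          else r.getD j 0 := by
  intro n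
  induction n with
  | zero => intro r _ j; rw [pvDescN, List.foldl_nil, if_neg (by omega)]
  | succ n ih =>
      intro r h j
      rw [pvDescN, List.foldl_cons]
      rw [ih (r.set n (if n ≠ 0 then r.getD n 0 + (p.getD (n-1) 0 - p.getD n 0 - r.getD (n-1) 0)
                       else r.getD n 0 - p.getD n 0))
            (by rw [List.length_set]; omega) j]
      have hne : ∀ (v : Int) (m : Nat), n ≠ m → (r.set n v).getD m 0 = r.getD m 0 :=
        fun v m hm => pv_getD_row_set_ne r n m v hm
      by_cases hj2 : j = n
      · subst hj2
        have hs : ∀ (v : Int), (r.set j v).getD j 0 = v :=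
          fun v => pv_getD_row_set_self r j v (by omega)
        simp only [hs]
        split_ifs <;> omega
      · by_cases hj : j < n
        · simp only [hne _ j (by omega), hne _ (j-1) (by omega)]
          split_ifs <;> omega
        · simp only [hne _ j (by omega)]
          split_ifs <;> omega

-- the matrix steps as single row updates
theorem pv_step1_eq (N : Nat) (s : List (List Int)) (i : Nat) (hi : i ≠ 0) :
    pvStep1 N s i
      = s.set i ((pvDescN N).foldl
          (fun r j => r.set j (r.getD j 0 - (s.getD (i-1) []).getD j 0)) (s.getD i [])) := by
  unfold pvStep1
  have hb : (fun (s' : List (List Int)) (j : Nat) =>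
        if i ≠ 0 then pvSetv s' i j (pvGetv s' i j - pvGetv s' (i-1) j) else s')
      = (fun s' j => pvSetv s' i j
          ((fun (pr r : List Int) (j : Nat) => r.getD j 0 - pr.getD j 0)
            (s'.getD (i-1) []) (s'.getD i []) j)) := by
    funext s' j
    rw [if_pos hi]
    rfl
  rw [hb]
  exact pv_foldl_rows (fun pr r j => r.getD j 0 - pr.getD j 0) i (i-1) (by omega) _ s

theorem pv_step1_zero (N : Nat) (s : List (List Int)) : pvStep1 N s 0 = s := by
  unfold pvStep1
  have hb : (fun (s' : List (List Int)) (j : Nat) =>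
        if (0:Nat) ≠ 0 then pvSetv s' 0 j (pvGetv s' 0 j - pvGetv s' (0-1) j) else s')
      = (fun (s' : List (List Int)) (_ : Nat) => s') := by
    funext s' j
    rw [if_neg (by omega)]
  rw [hb]
  exact pv_foldl_id _ s

theorem pv_step2_eq (N : Nat) (s : List (List Int)) (i : Nat) :
    pvStep2 N s i
      = s.set i ((pvDescN N).foldl
          (fun r j => r.set j (if j ≠ 0 then r.getD j 0 - r.getD (j-1) 0 else r.getD j 0))
          (s.getD i [])) := by
  unfold pvStep2
  have hb : (fun (s' : List (List Int)) (j : Nat) =>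
        if j ≠ 0 then pvSetv s' i j (pvGetv s' i j - pvGetv s' i (j-1)) else s')
      = (fun s' j => pvSetv s' i j
          ((fun (_pr r : List Int) (j : Nat) =>
              if j ≠ 0 then r.getD j 0 - r.getD (j-1) 0 else r.getD j 0)
            (s'.getD (i+1) []) (s'.getD i []) j)) := by
    funext s' j
    by_cases hj : j ≠ 0
    · rw [if_pos hj]
      simp only [if_pos hj]
      rfl
    · rw [if_neg hj]
      simp only [if_neg hj]
      exact (pv_setv_getv_self s' i j).symm
  rw [hb]
  exact pv_foldl_rows (fun _pr r j => if j ≠ 0 then r.getD j 0 - r.getD (j-1) 0 else r.getD j 0) i (i+1) (by omega) _ s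

theorem pv_stepB_eq (N : Nat) (s : List (List Int)) (i : Nat) (hi : i ≠ 0) :
    pvStepB N s i
      = s.set i ((pvDescN N).foldl
          (fun r j => r.set j
            (if j ≠ 0 then r.getD j 0 + ((s.getD (i-1) []).getD (j-1) 0 - (s.getD (i-1) []).getD j 0 - r.getD (j-1) 0)
             else r.getD j 0 - (s.getD (i-1) []).getD j 0))
          (s.getD i [])) := by
  unfold pvStepB
  have hb : (fun (s' : List (List Int)) (j : Nat) =>
        if i ≠ 0 ∧ j ≠ 0 then
          pvSetv s' i j (pvGetv s' i j + (pvGetv s' (i-1) (j-1) - pvGetv s' (i-1) j - pvGetv s' i (j-1)))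
        else if i ≠ 0 then pvSetv s' i j (pvGetv s' i j - pvGetv s' (i-1) j)
        else if j ≠ 0 then pvSetv s' i j (pvGetv s' i j - pvGetv s' i (j-1))
        else s')
      = (fun s' j => pvSetv s' i j
          ((fun (pr r : List Int) (j : Nat) =>
              if j ≠ 0 then r.getD j 0 + (pr.getD (j-1) 0 - pr.getD j 0 - r.getD (j-1) 0)
              else r.getD j 0 - pr.getD j 0)
            (s'.getD (i-1) []) (s'.getD i []) j)) := by
    funext s' j
    by_cases hj : j ≠ 0
    · rw [if_pos (And.intro hi hj)]
      simp only [if_pos hj]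
      rfl
    · rw [if_neg (by tauto), if_pos hi]
      simp only [if_neg hj]
      rfl
  rw [hb]
  exact pv_foldl_rows (fun pr r j => if j ≠ 0 then r.getD j 0 + (pr.getD (j-1) 0 - pr.getD j 0 - r.getD (j-1) 0) else r.getD j 0 - pr.getD j 0) i (i-1) (by omega) _ s

theorem pv_stepB_zero (N : Nat) (s : List (List Int)) :
    pvStepB N s 0
      = s.set 0 ((pvDescN N).foldl
          (fun r j => r.set j (if j ≠ 0 then r.getD j 0 - r.getD (j-1) 0 else r.getD j 0))
          (s.getD 0 [])) := by
  unfold pvStepB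
  have hb : (fun (s' : List (List Int)) (j : Nat) =>
        if (0:Nat) ≠ 0 ∧ j ≠ 0 then
          pvSetv s' 0 j (pvGetv s' 0 j + (pvGetv s' (0-1) (j-1) - pvGetv s' (0-1) j - pvGetv s' 0 (j-1)))
        else if (0:Nat) ≠ 0 then pvSetv s' 0 j (pvGetv s' 0 j - pvGetv s' (0-1) j)
        else if j ≠ 0 then pvSetv s' 0 j (pvGetv s' 0 j - pvGetv s' 0 (j-1))
        else s')
      = (fun s' j => pvSetv s' 0 j
          ((fun (_pr r : List Int) (j : Nat) =>
              if j ≠ 0 then r.getD j 0 - r.getD (j-1) 0 else r.getD j 0)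
            (s'.getD 1 []) (s'.getD 0 []) j)) := by
    funext s' j
    rw [if_neg (by simp), if_neg (by omega)]
    by_cases hj : j ≠ 0
    · rw [if_pos hj]
      simp only [if_pos hj]
      rfl
    · rw [if_neg hj]
      simp only [if_neg hj]
      exact (pv_setv_getv_self s' 0 j).symm
  rw [hb]
  exact pv_foldl_rows (fun _pr r j => if j ≠ 0 then r.getD j 0 - r.getD (j-1) 0 else r.getD j 0) 0 1 (by omega) _ s

-- matrix-level characterisations of the three sweeps
theorem pv_sw1_getv (N : Nat) :
    ∀ (k : Nat) (s : List (List Int)), k ≤ s.length →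
      (∀ q, q < k → N ≤ (s.getD q []).length) →
      ∀ i j, pvGetv ((pvDescN k).foldl (pvStep1 N) s) i j
        = if 1 ≤ i ∧ i < k ∧ j < N then pvGetv s i j - pvGetv s (i-1) j else pvGetv s i j := by
  intro k
  induction k with
  | zero => intro s _ _ i j; rw [pvDescN, List.foldl_nil, if_neg (by omega)]
  | succ k ih =>
      intro s hk hrows i j
      rw [pvDescN, List.foldl_cons]
      by_cases hk0 : k = 0
      · subst hk0
        rw [pv_step1_zero]
        rw [ih s (by omega) (fun q hq => absurd hq (by omega)) i j]
        split_ifs <;> omega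
      · rw [pv_step1_eq N s k hk0]
        have hrowlen : ((pvDescN N).foldl
            (fun r j => r.set j (r.getD j 0 - (s.getD (k-1) []).getD j 0)) (s.getD k [])).length
            = (s.getD k []).length := pv_rowfold_length _ _ _
        rw [ih _ (by rw [List.length_set]; omega)
              (by
                intro q hq
                rw [pv_getD_mat_set_ne _ _ _ _ (by omega)]
                exact hrows q (by omega)) i j]
        have hne : ∀ (v : List Int) (m : Nat), k ≠ m → (s.set k v).getD m [] = s.getD m [] :=
          fun v m hm => pv_getD_mat_set_ne s k m v hm
        by_cases h2 : i = k
        · subst h2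
          unfold pvGetv
          rw [pv_getD_mat_set_self _ _ _ (by omega)]
          rw [hne _ (i-1) (by omega)]
          simp only [pv_row1_getD (s.getD (i-1) []) N (s.getD i []) (hrows i (by omega))]
          split_ifs <;> omega
        · unfold pvGetv
          rw [hne _ i (by omega)]
          by_cases hi1 : i < k
          · rw [hne _ (i-1) (by omega)]
            split_ifs <;> omega
          · split_ifs <;> omega

theorem pv_sw2_getv (N : Nat) :
    ∀ (k : Nat) (s : List (List Int)), k ≤ s.length →
      (∀ q, q < k → N ≤ (s.getD q []).length) →
      ∀ i j, pvGetv ((pvDescN k).foldl (pvStep2 N) s) i j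
        = if i < k ∧ 1 ≤ j ∧ j < N then pvGetv s i j - pvGetv s i (j-1) else pvGetv s i j := by
  intro k
  induction k with
  | zero => intro s _ _ i j; rw [pvDescN, List.foldl_nil, if_neg (by omega)]
  | succ k ih =>
      intro s hk hrows i j
      rw [pvDescN, List.foldl_cons]
      rw [pv_step2_eq N s k]
      rw [ih _ (by rw [List.length_set]; omega)
            (by
              intro q hq
              rw [pv_getD_mat_set_ne _ _ _ _ (by omega)]
              exact hrows q (by omega)) i j]
      have hne : ∀ (v : List Int) (m : Nat), k ≠ m → (s.set k v).getD m [] = s.getD m [] :=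
        fun v m hm => pv_getD_mat_set_ne s k m v hm
      by_cases h2 : i = k
      · subst h2
        unfold pvGetv
        rw [pv_getD_mat_set_self _ _ _ (by omega)]
        simp only [pv_row2_getD N (s.getD i []) (hrows i (by omega))]
        split_ifs <;> omega
      · unfold pvGetv
        rw [hne _ i (by omega)]
        split_ifs <;> omega

theorem pv_swB_getv (N : Nat) :
    ∀ (k : Nat) (s : List (List Int)), k ≤ s.length →
      (∀ q, q < k → N ≤ (s.getD q []).length) →
      ∀ i j, pvGetv ((pvDescN k).foldl (pvStepB N) s) i j
        = if i < k ∧ j < N then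
            (if 1 ≤ i ∧ 1 ≤ j then
               pvGetv s i j + (pvGetv s (i-1) (j-1) - pvGetv s (i-1) j - pvGetv s i (j-1))
             else if 1 ≤ i then pvGetv s i j - pvGetv s (i-1) j
             else if 1 ≤ j then pvGetv s i j - pvGetv s i (j-1)
             else pvGetv s i j)
          else pvGetv s i j := by
  intro k
  induction k with
  | zero => intro s _ _ i j; rw [pvDescN, List.foldl_nil, if_neg (by omega)]
  | succ k ih =>
      intro s hk hrows i j
      rw [pvDescN, List.foldl_cons]
      by_cases hk0 : k = 0
      · subst hk0
        rw [pv_stepB_zero N s]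
        rw [ih _ (by rw [List.length_set]; omega) (fun q hq => absurd hq (by omega)) i j]
        have hne : ∀ (v : List Int) (m : Nat), (0:Nat) ≠ m → (s.set 0 v).getD m [] = s.getD m [] :=
          fun v m hm => pv_getD_mat_set_ne s 0 m v hm
        by_cases h2 : i = 0
        · subst h2
          unfold pvGetv
          rw [pv_getD_mat_set_self _ _ _ (by omega)]
          simp only [pv_row2_getD N (s.getD 0 []) (hrows 0 (by omega))]
          split_ifs <;> omega
        · unfold pvGetv
          rw [hne _ i (by omega)]
          split_ifs <;> omega
      · rw [pv_stepB_eq N s k hk0]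
        rw [ih _ (by rw [List.length_set]; omega)
              (by
                intro q hq
                rw [pv_getD_mat_set_ne _ _ _ _ (by omega)]
                exact hrows q (by omega)) i j]
        have hne : ∀ (v : List Int) (m : Nat), k ≠ m → (s.set k v).getD m [] = s.getD m [] :=
          fun v m hm => pv_getD_mat_set_ne s k m v hm
        by_cases h2 : i = k
        · subst h2
          unfold pvGetv
          rw [pv_getD_mat_set_self _ _ _ (by omega)]
          rw [hne _ (i-1) (by omega)]
          simp only [pv_rowB_getD (s.getD (i-1) []) N (s.getD i []) (hrows i (by omega))]
          split_ifs <;> omega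
        · unfold pvGetv
          rw [hne _ i (by omega)]
          by_cases hi1 : i < k
          · rw [hne _ (i-1) (by omega)]
            split_ifs <;> omega
          · split_ifs <;> omega

-- matrix extensionality from pvGetv
theorem pv_getD_eq_getElem (m : List (List Int)) (i : Nat) (h : i < m.length) :
    m.getD i [] = m[i] := by
  simp [List.getD_eq_getElem?_getD, List.getElem?_eq_getElem h]

theorem pv_getD_row_eq_getElem (r : List Int) (j : Nat) (h : j < r.length) :
    r.getD j 0 = r[j] := by
  simp [List.getD_eq_getElem?_getD, List.getElem?_eq_getElem h]

theorem pv_eq_of_getv (m1 m2 : List (List Int)) (hl : m1.length = m2.length)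
    (hr : ∀ q, (m1.getD q []).length = (m2.getD q []).length)
    (hg : ∀ i j, pvGetv m1 i j = pvGetv m2 i j) : m1 = m2 := by
  apply List.ext_getElem hl
  intro i h1 h2
  apply List.ext_getElem
  · have := hr i
    rwa [pv_getD_eq_getElem _ _ h1, pv_getD_eq_getElem _ _ h2] at this
  · intro j hj1 hj2
    have := hg i j
    unfold pvGetv at this
    rwa [pv_getD_eq_getElem _ _ h1, pv_getD_eq_getElem _ _ h2,
         pv_getD_row_eq_getElem _ _ hj1, pv_getD_row_eq_getElem _ _ hj2] at this

-- ===== VERDICT (by name: the statement is the Claim_ definition above) =====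
theorem moebius_transform_2d_spec : Claim_equal_moebius_transform_2d := by
  intro a n _ hpre
  unfold Spec_moebius_transform_2d
  rw [pv_portA_eq, pv_portB_eq]
  rcases (by omega : n.toNat = 0 ∨ n.toNat = 1 ∨ 2 ≤ n.toNat) with h0 | h0 | h0
  · rw [h0]; rfl
  · rw [h0]; rfl
  · have hn2 : ¬ (n ≤ 1) := by omega
    rcases hpre with h | hpre2
    · omega
    obtain ⟨hlen, hrows⟩ := hpre2
    have hlenN : n.toNat ≤ a.length := by omega
    have hrowsN : ∀ q, q < n.toNat → n.toNat ≤ (a.getD q []).length := by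
      intro q hq
      have hq2 : q < (a.take n.toNat).length := by
        rw [List.length_take]; omega
      have hmem : a.getD q [] ∈ a.take n.toNat := by
        rw [pv_getD_eq_getElem _ _ (by omega)]
        have he : (a.take n.toNat)[q]'hq2 = a[q]'(by omega) := List.getElem_take ..
        rw [← he]
        exact List.getElem_mem hq2
      have := hrows _ hmem
      omega
    have hs1 := pvShape_sw1 n.toNat a
    have hs2 := pvShape_sw2 n.toNat (pvSw1 n.toNat a)
    have hsB := pvShape_swB n.toNat a
    apply pv_eq_of_getv
    · exact (hs2.1.trans hs1.1).trans hsB.1.symm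
    · intro q
      exact ((hs2.2 q).trans (hs1.2 q)).trans (hsB.2 q).symm
    · intro i j
      show pvGetv ((pvDescN n.toNat).foldl (pvStep2 n.toNat) (pvSw1 n.toNat a)) i j
         = pvGetv ((pvDescN n.toNat).foldl (pvStepB n.toNat) a) i j
      rw [pv_sw2_getv n.toNat n.toNat (pvSw1 n.toNat a) (by rw [hs1.1]; omega)
            (by intro q hq; rw [hs1.2 q]; exact hrowsN q hq) i j]
      rw [pv_swB_getv n.toNat n.toNat a hlenN hrowsN i j]
      have hg1 : ∀ x y, pvGetv (pvSw1 n.toNat a) x y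
          = if 1 ≤ x ∧ x < n.toNat ∧ y < n.toNat then pvGetv a x y - pvGetv a (x-1) y
            else pvGetv a x y := by
        intro x y
        exact pv_sw1_getv n.toNat n.toNat a hlenN hrowsN x y
      simp only [hg1]
      split_ifs <;> omega
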